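-- pv_equiv track=rewrite | github.com/phillyb-tech/02_Code | ct_scan_baseline_visualization.py | build_plot_data
-- ===== SOURCE A (Python) =====
-- def build_plot_data(events, num_scanners):
--     """Organize events by scanner and compute summary stats."""
--     events_by_scanner = {i: [] for i in range(num_scanners)}
--     for evt in events:
--         events_by_scanner[evt["scanner"]].append(evt)
--
--     for evts in events_by_scanner.values():
--         evts.sort(key=lambda e: e["start"])
--
--     total_time = max(e["end"] for e in events) if events else 0
--     total_active = sum(e["end"] - e["start"] for e in events)
--     return events_by_scanner, total_time, total_active
-- ===== SOURCE B (Python) =====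
-- def build_plot_data(events, num_scanners):
--     """Organize events by scanner and compute summary stats."""
--     buckets = {
--         i: sorted((e for e in events if e["scanner"] == i), key=lambda e: e["start"])
--         for i in range(num_scanners)
--     }
--     total_time = 0
--     total_active = 0
--     first = True
--     for e in events:
--         end = e["end"]
--         if first or end > total_time:
--             total_time = end
--         total_active += end - e["start"]
--         first = False
--     return buckets, total_time, total_active
-- ===== Notes on version B (the rewrite author's own statement) =====
-- stated objective: alternative
-- what changed: B replaces A's dict-bucketing pass with per-bucket in-place sorts and two separate aggregate passes by a per-scanner filter-and-sort dict comprehension plus one single fold that tracks the running max end and the active-time sum.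
import Mathlib
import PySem

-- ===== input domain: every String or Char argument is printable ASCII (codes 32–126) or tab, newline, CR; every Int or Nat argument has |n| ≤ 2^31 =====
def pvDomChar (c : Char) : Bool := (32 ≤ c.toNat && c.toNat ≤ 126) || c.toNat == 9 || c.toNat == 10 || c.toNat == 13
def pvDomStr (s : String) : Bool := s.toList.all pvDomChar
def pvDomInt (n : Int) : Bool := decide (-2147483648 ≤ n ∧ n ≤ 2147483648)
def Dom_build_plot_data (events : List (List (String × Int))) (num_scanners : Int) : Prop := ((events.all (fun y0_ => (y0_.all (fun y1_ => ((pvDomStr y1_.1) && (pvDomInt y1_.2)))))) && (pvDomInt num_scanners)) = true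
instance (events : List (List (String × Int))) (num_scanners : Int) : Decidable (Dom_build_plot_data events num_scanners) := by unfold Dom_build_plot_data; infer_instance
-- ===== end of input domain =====

-- B builds each scanner's bucket by filter-and-sort and computes both summary stats in one fold;
-- same return value as A on Pre_ (alternative decomposition, no speed claim).

-- evt[k] for the event dicts (Pre_ guarantees the key is present wherever it is read)
def pvLook (e : List (String × Int)) (k : String) : Int := (PySem.Dict.mk e).getD k 0

-- ===== PORT A =====
def build_plot_data (events : List (List (String × Int))) (num_scanners : Int) : (List (Int × List (List (String × Int)))) × Int × Int :=
  -- events_by_scanner = {i: [] for i in range(num_scanners)}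
  let d0 := (PySem.List.pyRange 0 num_scanners 1).foldl
      (fun d i => d.insert i ([] : List (List (String × Int)))) PySem.Dict.empty
  -- for evt in events: events_by_scanner[evt["scanner"]].append(evt)
  let d1 := events.foldl (fun d evt => d.modify (pvLook evt "scanner") [] (· ++ [evt])) d0
  -- for evts in events_by_scanner.values(): evts.sort(key=lambda e: e["start"])
  let d2 := PySem.Dict.mk (d1.items.map
      (fun p => (p.1, PySem.List.sorted p.2 (fun e => pvLook e "start") false)))
  -- total_time = max(e["end"] for e in events) if events else 0
  let total_time : Int :=
    if events.isEmpty then 0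
    else (PySem.List.max? (events.map (fun e => pvLook e "end")) (fun y => y)).getD 0
  -- total_active = sum(e["end"] - e["start"] for e in events)
  let total_active := events.foldl (fun acc e => acc + (pvLook e "end" - pvLook e "start")) 0
  (d2.items, total_time, total_active)

-- ===== PORT B =====
def build_plot_data_alt (events : List (List (String × Int))) (num_scanners : Int) : (List (Int × List (List (String × Int)))) × Int × Int :=
  -- buckets = {i: sorted((e for e in events if e["scanner"] == i), key=lambda e: e["start"]) for i in range(num_scanners)}
  let buckets := (PySem.List.pyRange 0 num_scanners 1).map
      (fun i => (i, PySem.List.sorted (events.filter (fun e => pvLook e "scanner" == i))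
                      (fun e => pvLook e "start") false))
  -- one fold over events: state (total_time, total_active, first)
  let st := events.foldl
      (fun (acc : Int × Int × Bool) e =>
        let en := pvLook e "end"
        (if acc.2.2 || decide (en > acc.1) then en else acc.1,
         acc.2.1 + (en - pvLook e "start"),
         false))
      ((0 : Int), (0 : Int), true)
  (buckets, st.1, st.2.1)

-- ===== PRECONDITION & SPEC =====
-- Pre_ excludes exactly the inputs where A raises KeyError: an event whose "scanner"
-- value is outside range(num_scanners), or an event missing one of the three keys.
def Pre_build_plot_data (events : List (List (String × Int))) (num_scanners : Int) : Prop :=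
  ∀ e ∈ events,
    (PySem.Dict.mk e).contains "scanner" = true ∧
    (PySem.Dict.mk e).contains "start" = true ∧
    (PySem.Dict.mk e).contains "end" = true ∧
    0 ≤ pvLook e "scanner" ∧ pvLook e "scanner" < num_scanners
instance (events : List (List (String × Int))) (num_scanners : Int) : Decidable (Pre_build_plot_data events num_scanners) := by unfold Pre_build_plot_data; infer_instance

def pvWitness_build_plot_data : (List (List (String × Int))) × Int :=
  ([[("scanner", 0), ("start", 1), ("end", 3)], [("scanner", 0), ("start", 0), ("end", 2)]], 1)

def Spec_build_plot_data (events : List (List (String × Int))) (num_scanners : Int) (out : (List (Int × List (List (String × Int)))) × Int × Int) : Prop := out = build_plot_data_alt events num_scanners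
instance (events : List (List (String × Int))) (num_scanners : Int) (out : (List (Int × List (List (String × Int)))) × Int × Int) : Decidable (Spec_build_plot_data events num_scanners out) := by unfold Spec_build_plot_data; infer_instance

-- ===== CLAIM (what is proved, stated in full; the proofs are below) =====
def Claim_equal_build_plot_data : Prop := ∀ (events : List (List (String × Int))) (num_scanners : Int), Dom_build_plot_data events num_scanners → Pre_build_plot_data events num_scanners → Spec_build_plot_data events num_scanners (build_plot_data events num_scanners)

-- ===== LEMMAS AND PROOFS =====

-- Set.update adds nothing when every element is already present
theorem pv_update_of_mem {α : Type} [DecidableEq α] (xs : List α) (s : List α)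
    (h : ∀ x ∈ xs, x ∈ s) : PySem.Set.update s xs = s := by
  induction xs generalizing s with
  | nil => simp [PySem.Set.update]
  | cons x t ih =>
    have hx : PySem.Set.contains s x = true := by
      simp [PySem.Set.contains]
      exact h x (by simp)
    simp only [PySem.Set.update, List.foldl_cons, PySem.Set.add, hx, if_pos]
    exact ih s (fun y hy => h y (List.mem_cons_of_mem _ hy))

-- A's grouped-and-sorted dict has the same items as B's per-scanner filter-and-sort comprehension
theorem pv_buckets (events : List (List (String × Int))) (n : Int)
    (hpre : ∀ e ∈ events, 0 ≤ pvLook e "scanner" ∧ pvLook e "scanner" < n) :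
    (PySem.Dict.mk
      ((events.foldl (fun d evt => d.modify (pvLook evt "scanner") [] (· ++ [evt]))
        ((PySem.List.pyRange 0 n 1).foldl
          (fun d i => d.insert i ([] : List (List (String × Int)))) PySem.Dict.empty)).items.map
        (fun p => (p.1, PySem.List.sorted p.2 (fun e => pvLook e "start") false)))).items
    = (PySem.List.pyRange 0 n 1).map
        (fun i => (i, PySem.List.sorted (events.filter (fun e => pvLook e "scanner" == i))
                        (fun e => pvLook e "start") false)) := by
  set r := PySem.List.pyRange 0 n 1 with hr
  set d0 := r.foldl (fun d i => d.insert i ([] : List (List (String × Int)))) PySem.Dict.empty with hd0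
  set d1 := events.foldl (fun d evt => d.modify (pvLook evt "scanner") [] (· ++ [evt])) d0 with hd1
  have h0items : d0.items = r.map (fun i => (i, ([] : List (List (String × Int))))) := by
    rw [hd0]
    have := PySem.Dict.items_foldl_insert_fresh r (fun i => i)
      (fun _ => ([] : List (List (String × Int)))) PySem.Dict.empty
      (fun a _ => by simp) (by simpa using PySem.List.nodup_pyRange_one 0 n)
    simpa using this
  have h0keys : d0.keys = r := by
    simp [PySem.Dict.keys, h0items, Function.comp_def]
  have h0nodup : d0.keys.Nodup := by rw [h0keys]; exact PySem.List.nodup_pyRange_one 0 n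
  have h1keys : d1.keys = r := by
    rw [hd1]
    have := PySem.Dict.keys_foldl_modify_key events (fun evt => pvLook evt "scanner")
      ([] : List (List (String × Int))) (fun _ evt v => v ++ [evt]) d0
    rw [this, h0keys]
    refine pv_update_of_mem _ _ ?_
    intro x hx
    simp only [List.mem_map] at hx
    obtain ⟨e, he, rfl⟩ := hx
    rw [hr, PySem.List.mem_pyRange_one]
    exact hpre e he
  have h1nodup : d1.keys.Nodup := by rw [h1keys]; exact PySem.List.nodup_pyRange_one 0 n
  have h0getD : ∀ i ∈ r, d0.getD i [] = [] := by
    intro i hi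
    refine PySem.Dict.getD_of_mem_items d0 ?_ h0nodup []
    rw [h0items]; exact List.mem_map.2 ⟨i, hi, rfl⟩
  have h1getD : ∀ c, d1.getD c [] = d0.getD c [] ++ events.filter (fun e => pvLook e "scanner" == c) := by
    intro c
    have h := PySem.Dict.getD_foldl_modify_append (events.map (fun e => (pvLook e "scanner", e))) d0 c
    simp only [List.foldl_map, List.filter_map, List.map_map, Function.comp_def] at h
    rw [hd1]
    simpa using h
  have h1items : d1.items = r.map (fun k => (k, d1.getD k [])) := by
    rw [PySem.Dict.items_eq_map_keys d1 h1nodup [], h1keys]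
  show (d1.items.map (fun p => (p.1, PySem.List.sorted p.2 (fun e => pvLook e "start") false))) = _
  rw [h1items, List.map_map]
  refine List.map_congr_left ?_
  intro i hi
  simp only [Function.comp]
  rw [h1getD, h0getD i hi]
  simp

-- the combined stats fold, once the first event has been absorbed
theorem pv_fold_stats (l : List (List (String × Int))) (t s : Int) :
    l.foldl
      (fun (acc : Int × Int × Bool) e =>
        let en := pvLook e "end"
        (if acc.2.2 || decide (en > acc.1) then en else acc.1,
         acc.2.1 + (en - pvLook e "start"),
         false))
      (t, s, false)
    = ((l.map (fun e => pvLook e "end")).foldl max t,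
       s + (l.map (fun e => pvLook e "end" - pvLook e "start")).sum,
       false) := by
  induction l generalizing t s with
  | nil => simp
  | cons e rest ih =>
    simp only [List.foldl_cons, List.map_cons, List.sum_cons]
    rw [ih]
    have h1 : (if (false || decide (pvLook e "end" > t)) = true then pvLook e "end" else t)
        = max t (pvLook e "end") := by
      by_cases hc : pvLook e "end" > t <;> simp [hc] <;> omega
    rw [h1, add_assoc]

-- ===== VERDICT (by name: the statement is the Claim_ definition above) =====
theorem build_plot_data_spec : Claim_equal_build_plot_data := by
  intro events n _dom hpre
  unfold Spec_build_plot_data build_plot_data build_plot_data_alt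
  refine Prod.ext ?_ (Prod.ext ?_ ?_) <;> dsimp only
  · exact pv_buckets events n (fun e he => ⟨(hpre e he).2.2.2.1, (hpre e he).2.2.2.2⟩)
  · cases events with
    | nil => simp
    | cons e rest =>
      simp only [List.isEmpty_cons, List.map_cons, PySem.List.max?_id_cons,
        List.foldl_cons, Bool.true_or, if_pos, Option.getD_some]
      rw [pv_fold_stats]
      simp [List.foldl_map]
  · cases events with
    | nil => simp
    | cons e rest =>
      rw [show (fun (acc : Int) e => acc + (pvLook e "end" - pvLook e "start"))
            = (fun acc e => acc + (fun e => pvLook e "end" - pvLook e "start") e) from rfl,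
          PySem.List.foldl_add]
      simp only [List.foldl_cons]
      rw [pv_fold_stats]
      simp
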